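-- pv_equiv track=rewrite | github.com/TERADA-DANTE/algorithm | python/acmicpc/_2606.py | solution
-- ===== SOURCE A (Python) =====
-- class Union:
--     def __init__(self, data):
--         self.node = [i for i in range(data+1)]
--
--     def _find(self, i):
--         if self.node[i] != i:
--             return self._find(self.node[i])
--         return i
--
--     def set(self, x, y):
--         parent, child = sorted([self._find(x), self._find(y)])
--         self.node[child] = parent
--
-- def solution(n, pairs):
--     union = Union(n)
--     cnt = 0
--     for x, y in pairs:
--         union.set(x, y)
--     for i in range(n+1):
--         if union._find(i) == 1:
--             cnt += 1
--     return cnt-1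
-- ===== SOURCE B (Python) =====
-- def solution(n, pairs):
--     # Label-propagation instead of a parent forest: comp[i] is the current
--     # representative (the minimum) of i's component; a union relabels in one pass.
--     comp = list(range(n + 1))
--     for x, y in pairs:
--         a, b = comp[x], comp[y]
--         if a != b:
--             lo, hi = (a, b) if a < b else (b, a)
--             comp = [lo if c == hi else c for c in comp]
--     return sum(1 for c in comp if c == 1) - 1
-- ===== Notes on version B (the rewrite author's own statement) =====
-- stated objective: alternative
-- what changed: Replaces the recursive parent-pointer forest (Union class with recursive _find and min-root link) by a flat label array: each union relabels the larger label to the smaller in one list pass, and the answer is a direct count of labels equal to 1 — no trees, no recursion, no final find pass.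
import Mathlib
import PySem

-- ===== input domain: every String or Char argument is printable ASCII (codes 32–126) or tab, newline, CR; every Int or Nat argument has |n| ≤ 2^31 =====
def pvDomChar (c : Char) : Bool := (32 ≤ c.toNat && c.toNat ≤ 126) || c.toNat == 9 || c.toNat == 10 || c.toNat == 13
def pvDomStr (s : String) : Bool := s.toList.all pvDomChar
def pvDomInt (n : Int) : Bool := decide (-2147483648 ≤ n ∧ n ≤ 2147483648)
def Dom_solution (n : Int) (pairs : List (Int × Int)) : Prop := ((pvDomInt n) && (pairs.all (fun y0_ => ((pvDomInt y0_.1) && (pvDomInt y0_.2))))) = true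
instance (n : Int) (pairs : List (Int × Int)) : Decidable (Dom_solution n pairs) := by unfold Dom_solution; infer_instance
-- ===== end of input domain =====

-- B replaces A's recursive parent-pointer forest by a flat label array (one relabel pass per
-- union, then a direct count); same return value, no speed claim.

-- ===== PORT A =====
-- Python's self.node is a mutable array; the port keeps it as Array Int (O(1) indexing).
-- aGet? / aSetD are node[i] / node[i] = v with Python's exact index rule (negative wrap,
-- none = IndexError), expressed through PySem.List.pyIdx? — same semantics as PySem.List.pyGet?/pySetD.
def aGet? (a : Array Int) (i : Int) : Option Int :=
  (PySem.List.pyIdx? a.size i).bind fun k => a[k]?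

def aSetD (a : Array Int) (i v : Int) : Array Int :=
  match PySem.List.pyIdx? a.size i with
  | some k => a.setIfInBounds k v
  | none => a

-- Union._find: recursive parent chasing.  The fuel (node.size + 1) only makes the
-- recursion total: inside Pre_solution parent pointers strictly decrease, so it never runs out.
def findAr (node : Array Int) : Nat → Int → Int
  | 0, i => i
  | f + 1, i =>
    match aGet? node i with
    | some v => if v ≠ i then findAr node f v else i
    | none => i  -- IndexError in Python; excluded by Pre_solution

-- Union.set
def setAr (node : Array Int) (x y : Int) : Array Int :=
  let fx := findAr node (node.size + 1) x
  let fy := findAr node (node.size + 1) y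
  match PySem.List.sorted [fx, fy] (fun v => v) with
  | [parent, child] => aSetD node child parent  -- self.node[child] = parent
  | _ => node  -- unreachable: sorted of a two-element list has two elements

def solution (n : Int) (pairs : List (Int × Int)) : Int :=
  let node := ((PySem.List.pyRange 0 (n + 1) 1).toArray : Array Int)
  let node := pairs.foldl (fun nd p => setAr nd p.1 p.2) node
  let cnt := (PySem.List.pyRange 0 (n + 1) 1).foldl
    (fun c i => if findAr node (node.size + 1) i = 1 then c + 1 else c) 0
  cnt - 1

-- ===== PORT B =====
def unionB (comp : List Int) (x y : Int) : List Int :=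
  match PySem.List.pyGet? comp x, PySem.List.pyGet? comp y with
  | some a, some b =>
    if a ≠ b then
      let lo := if a < b then a else b
      let hi := if a < b then b else a
      comp.map (fun c => if c = hi then lo else c)
    else comp
  | _, _ => comp  -- IndexError in Python; excluded by Pre_solution

def solution_alt (n : Int) (pairs : List (Int × Int)) : Int :=
  let comp := pairs.foldl (fun cp p => unionB cp p.1 p.2) (PySem.List.pyRange 0 (n + 1) 1)
  (comp.foldl (fun c v => if v = 1 then c + 1 else c) 0) - 1

-- ===== PRECONDITION & SPEC =====
-- Pre_ excludes exactly the pairs whose endpoints make Python's node[x] raise IndexError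
-- (x < -(n+1) or x > n); everything A returns on — including in-range negative indices — is admitted.
def Pre_solution (n : Int) (pairs : List (Int × Int)) : Prop :=
  ∀ p ∈ pairs, -(n + 1) ≤ p.1 ∧ p.1 ≤ n ∧ -(n + 1) ≤ p.2 ∧ p.2 ≤ n
instance (n : Int) (pairs : List (Int × Int)) : Decidable (Pre_solution n pairs) := by
  unfold Pre_solution; infer_instance

def pvWitness_solution : Int × (List (Int × Int)) := (4, [(1, 2), (2, 3), (-1, 4)])

def Spec_solution (n : Int) (pairs : List (Int × Int)) (out : Int) : Prop := out = solution_alt n pairs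
instance (n : Int) (pairs : List (Int × Int)) (out : Int) : Decidable (Spec_solution n pairs out) := by
  unfold Spec_solution; infer_instance

-- ===== CLAIM (what is proved, stated in full; the proofs are below) =====
def Claim_equal_solution : Prop := ∀ (n : Int) (pairs : List (Int × Int)),
  Dom_solution n pairs → Pre_solution n pairs → Spec_solution n pairs (solution n pairs)

-- ===== LEMMAS AND PROOFS =====

-- ghost List-level versions of A's loop (the proofs run over these; the port's Array
-- pipeline is bridged to them by `toList`)
def findA (node : List Int) : Nat → Int → Int
  | 0, i => i
  | f + 1, i =>
    match PySem.List.pyGet? node i with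
    | some v => if v ≠ i then findA node f v else i
    | none => i

def setA (node : List Int) (x y : Int) : List Int :=
  let fx := findA node (node.length + 1) x
  let fy := findA node (node.length + 1) y
  match PySem.List.sorted [fx, fy] (fun v => v) with
  | [parent, child] => PySem.List.pySetD node child parent
  | _ => node

lemma sorted_pair (a b : Int) :
    PySem.List.sorted [a, b] (fun v => v) = if a ≤ b then [a, b] else [b, a] := by
  simp [PySem.List.sorted, PySem.List.insertBy]
  split_ifs <;> simp_all <;> omega

lemma aGet?_eq (a : Array Int) (i : Int) : aGet? a i = PySem.List.pyGet? a.toList i := by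
  simp [aGet?, PySem.List.pyGet?, Array.length_toList, Array.getElem?_toList]

lemma aSetD_toList (a : Array Int) (i v : Int) :
    (aSetD a i v).toList = PySem.List.pySetD a.toList i v := by
  simp only [aSetD, PySem.List.pySetD, PySem.List.pySet?, Array.length_toList]
  cases PySem.List.pyIdx? a.size i with
  | none => rfl
  | some k => simp [Array.toList_setIfInBounds]

lemma findAr_eq (node : Array Int) (f : Nat) : ∀ i : Int,
    findAr node f i = findA node.toList f i := by
  induction f with
  | zero => intro i; rfl
  | succ f ih =>
    intro i
    simp only [findAr, findA, aGet?_eq]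
    cases PySem.List.pyGet? node.toList i with
    | none => rfl
    | some v => simp only [ih]

lemma setAr_toList (node : Array Int) (x y : Int) :
    (setAr node x y).toList = setA node.toList x y := by
  simp only [setAr, setA, findAr_eq, Array.length_toList]
  rw [sorted_pair]
  by_cases h : findA node.toList (node.size + 1) x ≤ findA node.toList (node.size + 1) y
  · rw [if_pos h]
    exact aSetD_toList ..
  · rw [if_neg h]
    exact aSetD_toList ..

lemma foldl_setAr_toList (ps : List (Int × Int)) : ∀ a : Array Int,
    (ps.foldl (fun nd p => setAr nd p.1 p.2) a).toList
      = ps.foldl (fun nd p => setA nd p.1 p.2) a.toList := by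
  induction ps with
  | nil => intro a; rfl
  | cons p ps ih => intro a; simp only [List.foldl_cons, ih, setAr_toList]

-- parent pointers are nonnegative and never increase
def BdA (node : List Int) : Prop :=
  ∀ j, j < node.length → 0 ≤ node.getD j 0 ∧ node.getD j 0 ≤ (j : Int)

-- the invariant tying A's forest to B's label array: same length, bounded parents,
-- and the root of j in the forest is exactly j's label
def InvAB (node comp : List Int) : Prop :=
  node.length = comp.length ∧ BdA node ∧
  ∀ j, j < node.length → findA node (node.length + 1) (j : Int) = comp.getD j 0

lemma pyGet?_getD (node : List Int) (j : Nat) (h : j < node.length) :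
    PySem.List.pyGet? node (j : Int) = some (node.getD j 0) := by
  rw [PySem.List.pyGet?_natCast, List.getElem?_eq_getElem h, List.getD_eq_getElem node 0 h]

lemma findA_step (node : List Int) (f : Nat) (j : Nat) (h : j < node.length) :
    findA node (f + 1) (j : Int)
      = if node.getD j 0 ≠ (j : Int) then findA node f (node.getD j 0) else (j : Int) := by
  simp only [findA, pyGet?_getD node j h]

lemma findA_fuel (node : List Int) (hbd : BdA node) :
    ∀ j : Nat, j < node.length → ∀ f₁ f₂ : Nat, j < f₁ → j < f₂ →
      findA node f₁ (j : Int) = findA node f₂ (j : Int) := by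
  intro j
  induction j using Nat.strong_induction_on with
  | _ j ih =>
    intro hj f₁ f₂ h1 h2
    cases f₁ with
    | zero => omega
    | succ g₁ =>
      cases f₂ with
      | zero => omega
      | succ g₂ =>
        rw [findA_step node g₁ j hj, findA_step node g₂ j hj]
        by_cases hv : node.getD j 0 = (j : Int)
        · rw [if_neg (by simpa using hv), if_neg (by simpa using hv)]
        · obtain ⟨h0, hle⟩ := hbd j hj
          have hk : ((node.getD j 0).toNat : Int) = node.getD j 0 := Int.toNat_of_nonneg h0
          rw [if_pos hv, if_pos hv, ← hk]
          exact ih (node.getD j 0).toNat (by omega) (by omega) g₁ g₂ (by omega) (by omega)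

lemma findA_root (node : List Int) (hbd : BdA node) :
    ∀ j : Nat, j < node.length → ∃ r : Nat, r ≤ j ∧ r < node.length ∧
      findA node (node.length + 1) (j : Int) = (r : Int) ∧ node.getD r 0 = (r : Int) := by
  intro j
  induction j using Nat.strong_induction_on with
  | _ j ih =>
    intro hj
    rw [findA_step node node.length j hj]
    by_cases hv : node.getD j 0 = (j : Int)
    · exact ⟨j, le_refl _, hj, by rw [if_neg (by simpa using hv)], hv⟩
    · obtain ⟨h0, hle⟩ := hbd j hj
      have hk : ((node.getD j 0).toNat : Int) = node.getD j 0 := Int.toNat_of_nonneg h0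
      obtain ⟨r, hr1, hr2, hr3, hr4⟩ := ih (node.getD j 0).toNat (by omega) (by omega)
      refine ⟨r, by omega, hr2, ?_, hr4⟩
      rw [if_pos hv, ← hk,
        findA_fuel node hbd (node.getD j 0).toNat (by omega) node.length (node.length + 1)
          (by omega) (by omega)]
      exact hr3

lemma findA_fix (node : List Int) (j : Nat) (hj : j < node.length)
    (hv : node.getD j 0 = (j : Int)) :
    findA node (node.length + 1) (j : Int) = (j : Int) := by
  rw [findA_step node node.length j hj, if_neg (by simpa using hv)]

lemma findA_neg (node : List Int) (hbd : BdA node) (x : Int)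
    (hx1 : -(node.length : Int) ≤ x) (hx2 : x < 0) :
    findA node (node.length + 1) x
      = findA node (node.length + 1) (((x + node.length).toNat : Nat) : Int) := by
  have hjlt : (x + (node.length : Int)).toNat < node.length := by omega
  have hx' : x = -(((-x).toNat : Nat) : Int) := by omega
  have hget : PySem.List.pyGet? node x = some (node.getD (x + (node.length : Int)).toNat 0) := by
    conv_lhs => rw [hx']
    rw [PySem.List.pyGet?_neg_natCast node (-x).toNat (by omega) (by omega)]
    rw [show node.length - (-x).toNat = (x + (node.length : Int)).toNat by omega,
      List.getElem?_eq_getElem hjlt, List.getD_eq_getElem node 0 hjlt]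
  set j := (x + (node.length : Int)).toNat with hjdef
  have h0 : 0 ≤ node.getD j 0 := (hbd j hjlt).1
  have hne : node.getD j 0 ≠ x := by omega
  rw [show findA node (node.length + 1) x
      = if node.getD j 0 ≠ x then findA node node.length (node.getD j 0) else x by
    simp only [findA, hget]]
  rw [if_pos hne, findA_step node node.length j hjlt]
  by_cases hv : node.getD j 0 = (j : Int)
  · rw [if_neg (by simpa using hv), hv,
      findA_fuel node hbd j hjlt node.length (node.length + 1) (by omega) (by omega),
      findA_fix node j hjlt hv]
  · rw [if_pos hv]

lemma getD_set' (l : List Int) (i j : Nat) (v : Int) (h : j < l.length) :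
    (l.set i v).getD j 0 = if i = j then v else l.getD j 0 := by
  simp only [List.getD_eq_getElem?_getD, List.getElem?_set]
  split_ifs <;> simp_all

lemma findA_set (node : List Int) (hbd : BdA node) (p c : Nat)
    (hp : p ≤ c) (hc : c < node.length)
    (hcr : node.getD c 0 = (c : Int)) (hpr : node.getD p 0 = (p : Int)) :
    ∀ j : Nat, j < node.length → ∀ f : Nat, j < f →
      findA (node.set c ((p : Nat) : Int)) f (j : Int)
        = if findA node (node.length + 1) (j : Int) = (c : Int) then ((p : Nat) : Int)
          else findA node (node.length + 1) (j : Int) := by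
  intro j
  induction j using Nat.strong_induction_on with
  | _ j ih =>
    intro hj f hf
    cases f with
    | zero => omega
    | succ g =>
      have hlen : (node.set c ((p : Nat) : Int)).length = node.length := by simp
      rw [findA_step _ g j (by rw [hlen]; exact hj), getD_set' node c j ((p : Nat) : Int) hj]
      by_cases hjc : c = j
      · subst hjc
        rw [if_pos rfl, findA_fix node c hc hcr, if_pos rfl]
        rcases Nat.lt_or_ge p c with hpc | hpc
        · have hne : ((p : Nat) : Int) ≠ (c : Int) := by
            simp only [ne_eq, Nat.cast_inj]; omega
          rw [if_pos hne, ih p hpc (by omega) g (by omega),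
            findA_fix node p (by omega) hpr, if_neg hne]
        · have hpc' : p = c := by omega
          subst hpc'
          rw [if_neg (by simp)]
      · rw [if_neg hjc]
        by_cases hv : node.getD j 0 = (j : Int)
        · have hne : (j : Int) ≠ (c : Int) := by
            simp only [ne_eq, Nat.cast_inj]; omega
          rw [if_neg (by simpa using hv), findA_fix node j hj hv, if_neg hne]
        · obtain ⟨h0, hle⟩ := hbd j hj
          have hk : ((node.getD j 0).toNat : Int) = node.getD j 0 := Int.toNat_of_nonneg h0
          have hunf : findA node (node.length + 1) (j : Int)
              = findA node (node.length + 1) (((node.getD j 0).toNat : Nat) : Int) := by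
            rw [findA_step node node.length j hj, if_pos hv, ← hk]
            exact findA_fuel node hbd (node.getD j 0).toNat (by omega) node.length
              (node.length + 1) (by omega) (by omega)
          rw [if_pos hv, ← hk, ih (node.getD j 0).toNat (by omega) (by omega) g (by omega), hunf]

lemma getD_map_if (comp : List Int) (g : Int → Int) (j : Nat) (h : j < comp.length) :
    (comp.map g).getD j 0 = g (comp.getD j 0) := by
  rw [List.getD_eq_getElem (comp.map g) 0 (by simpa using h), List.getElem_map,
    List.getD_eq_getElem comp 0 h]

lemma pySetD_eq_set (xs : List Int) (i v : Int) (h1 : 0 ≤ i) (h2 : i < xs.length) :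
    PySem.List.pySetD xs i v = xs.set i.toNat v := by
  simp only [PySem.List.pySetD, PySem.List.pySet?, PySem.List.pyIdx?]
  split_ifs <;> simp_all

lemma set_getD_self (l : List Int) (i : Nat) (h : i < l.length) :
    l.set i (l.getD i 0) = l := by
  rw [List.getD_eq_getElem l 0 h]; exact List.set_getElem_self ..

-- one pair lookup, shared by both sides: the effective (wrapped) index
lemma lookup_idx (node : List Int) (hbd : BdA node) (x : Int)
    (h1 : -(node.length : Int) ≤ x) (h2 : x < (node.length : Int)) :
    ∃ jx : Nat, jx < node.length ∧
      findA node (node.length + 1) x = findA node (node.length + 1) ((jx : Nat) : Int) ∧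
      (∀ comp : List Int, comp.length = node.length →
        PySem.List.pyGet? comp x = some (comp.getD jx 0)) := by
  by_cases hneg : x < 0
  · refine ⟨(x + (node.length : Int)).toNat, by omega, findA_neg node hbd x h1 hneg, ?_⟩
    intro comp hlc
    have hlt : (x + (node.length : Int)).toNat < comp.length := by omega
    have hg : PySem.List.pyGet? comp x = comp[(x + (node.length : Int)).toNat]? := by
      conv_lhs => rw [show x = -(((-x).toNat : Nat) : Int) by omega]
      rw [PySem.List.pyGet?_neg_natCast comp (-x).toNat (by omega) (by omega)]
      congr 1
      omega
    rw [hg, List.getElem?_eq_getElem hlt, List.getD_eq_getElem comp 0 hlt]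
  · refine ⟨x.toNat, by omega, by rw [Int.toNat_of_nonneg (by omega)], ?_⟩
    intro comp hlc
    have hlt : x.toNat < comp.length := by omega
    rw [PySem.List.pyGet?_of_nonneg comp (by omega), List.getElem?_eq_getElem hlt,
      List.getD_eq_getElem comp 0 hlt]

lemma step_preserves (node comp : List Int) (x y : Int) (hI : InvAB node comp)
    (hx1 : -(node.length : Int) ≤ x) (hx2 : x < (node.length : Int))
    (hy1 : -(node.length : Int) ≤ y) (hy2 : y < (node.length : Int)) :
    InvAB (setA node x y) (unionB comp x y) ∧ (setA node x y).length = node.length := by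
  obtain ⟨hlen, hbd, hroot⟩ := hI
  obtain ⟨jx, hjx, hfx, hgx⟩ := lookup_idx node hbd x hx1 hx2
  obtain ⟨jy, hjy, hfy, hgy⟩ := lookup_idx node hbd y hy1 hy2
  obtain ⟨rx, hrx1, hrx2, hrx3, hrx4⟩ := findA_root node hbd jx hjx
  obtain ⟨ry, hry1, hry2, hry3, hry4⟩ := findA_root node hbd jy hjy
  have hax : comp.getD jx 0 = (rx : Int) := by rw [← hroot jx hjx, hrx3]
  have hay : comp.getD jy 0 = (ry : Int) := by rw [← hroot jy hjy, hry3]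
  have hFx : findA node (node.length + 1) x = (rx : Int) := by rw [hfx, hrx3]
  have hFy : findA node (node.length + 1) y = (ry : Int) := by rw [hfy, hry3]
  have hBx := hgx comp hlen.symm
  have hBy := hgy comp hlen.symm
  have hB : unionB comp x y
      = if (rx : Int) ≠ (ry : Int)
        then comp.map (fun c =>
          if c = (if (rx : Int) < (ry : Int) then (ry : Int) else (rx : Int))
          then (if (rx : Int) < (ry : Int) then (rx : Int) else (ry : Int)) else c)
        else comp := by
    simp only [unionB, hBx, hBy, hax, hay]
  have hA : setA node x y
      = if (rx : Int) ≤ (ry : Int)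
        then PySem.List.pySetD node (ry : Int) (rx : Int)
        else PySem.List.pySetD node (rx : Int) (ry : Int) := by
    simp only [setA, hFx, hFy, sorted_pair]
    by_cases h : (rx : Int) ≤ (ry : Int)
    · rw [if_pos h, if_pos h]
    · rw [if_neg h, if_neg h]
  by_cases heq : rx = ry
  · -- same root: A rewrites the root with itself, B keeps the labels; both are no-ops
    subst heq
    have hAx : setA node x y = node := by
      rw [hA, if_pos (le_refl _), pySetD_eq_set node _ _ (by omega) (by omega),
        show ((rx : Int)).toNat = rx by omega, ← hrx4, set_getD_self node rx hrx2]
    have hBc : unionB comp x y = comp := by rw [hB, if_neg (by simp)]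
    rw [hAx, hBc]
    exact ⟨⟨hlen, hbd, hroot⟩, rfl⟩
  · -- genuine union: A writes lo at index hi, B relabels hi to lo
    have hne : (rx : Int) ≠ (ry : Int) := by simp only [ne_eq, Nat.cast_inj]; omega
    set lo : Nat := min rx ry with hlo
    set hi : Nat := max rx ry with hhi
    have hhiL : hi < node.length := by omega
    have hhir : node.getD hi 0 = (hi : Int) := by
      rcases Nat.le_total rx ry with h | h
      · rw [show hi = ry by omega]; exact hry4
      · rw [show hi = rx by omega]; exact hrx4
    have hlor : node.getD lo 0 = (lo : Int) := by
      rcases Nat.le_total rx ry with h | h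
      · rw [show lo = rx by omega]; exact hrx4
      · rw [show lo = ry by omega]; exact hry4
    have hA' : setA node x y = node.set hi ((lo : Nat) : Int) := by
      rw [hA]
      by_cases h : (rx : Int) ≤ (ry : Int)
      · rw [if_pos h, pySetD_eq_set node _ _ (by omega) (by omega)]
        congr 1 <;> omega
      · rw [if_neg (by omega), pySetD_eq_set node _ _ (by omega) (by omega)]
        congr 1 <;> omega
    have hB' : unionB comp x y
        = comp.map (fun c => if c = ((hi : Nat) : Int) then ((lo : Nat) : Int) else c) := by
      rw [hB, if_pos hne]
      congr 1
      funext c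
      have e1 : (if (rx : Int) < (ry : Int) then (ry : Int) else (rx : Int))
          = ((hi : Nat) : Int) := by
        simp only [hhi]; split_ifs <;> omega
      have e2 : (if (rx : Int) < (ry : Int) then (rx : Int) else (ry : Int))
          = ((lo : Nat) : Int) := by
        simp only [hlo]; split_ifs <;> omega
      rw [e1, e2]
    rw [hA', hB']
    have hlen' : (node.set hi ((lo : Nat) : Int)).length = node.length := by simp
    refine ⟨⟨by simp [hlen], ?_, ?_⟩, hlen'⟩
    · intro j hj
      rw [hlen'] at hj
      rw [getD_set' node hi j _ hj]
      split_ifs with h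
      · constructor
        · omega
        · have h1 : lo ≤ hi := by omega
          omega
      · exact hbd j hj
    · intro j hj
      rw [hlen'] at hj
      rw [hlen']
      rw [findA_set node hbd lo hi (by omega) hhiL hhir hlor j hj (node.length + 1) (by omega),
        getD_map_if comp _ j (by omega), ← hroot j hj]

lemma fold_preserves (ps : List (Int × Int)) :
    ∀ node comp : List Int, InvAB node comp →
    (∀ p ∈ ps, -(node.length : Int) ≤ p.1 ∧ p.1 < (node.length : Int) ∧
      -(node.length : Int) ≤ p.2 ∧ p.2 < (node.length : Int)) →
    InvAB (ps.foldl (fun nd p => setA nd p.1 p.2) node)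
      (ps.foldl (fun cp p => unionB cp p.1 p.2) comp) ∧
    (ps.foldl (fun nd p => setA nd p.1 p.2) node).length = node.length := by
  induction ps with
  | nil => intro node comp hI _; exact ⟨hI, rfl⟩
  | cons p ps ih =>
    intro node comp hI hb
    obtain ⟨h1, h2, h3, h4⟩ := hb p (by simp)
    obtain ⟨hI', hlen'⟩ := step_preserves node comp p.1 p.2 hI h1 h2 h3 h4
    simp only [List.foldl_cons]
    obtain ⟨hI'', hlen''⟩ := ih (setA node p.1 p.2) (unionB comp p.1 p.2) hI'
      (by intro q hq; rw [hlen']; exact hb q (by simp [hq]))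
    exact ⟨hI'', by rw [hlen'', hlen']⟩

lemma pyRange0_eq (m : Int) :
    PySem.List.pyRange 0 m 1 = List.map (fun k : Nat => (k : Int)) (List.range m.toNat) := by
  by_cases h : 0 ≤ m
  · conv_lhs => rw [show m = ((m.toNat : Nat) : Int) by omega]
    exact PySem.List.pyRange_zero_natCast m.toNat
  · have h1 : PySem.List.pyRange 0 m 1 = [] := by
      apply List.eq_nil_iff_forall_not_mem.mpr
      intro x hx
      have := PySem.List.mem_pyRange_one.mp hx
      omega
    rw [h1, show m.toNat = 0 by omega]
    rfl

lemma map_getD_range (l : List Int) :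
    List.map (fun j => l.getD j 0) (List.range l.length) = l := by
  apply List.ext_getElem
  · simp
  · intro i h1 h2
    simp only [List.getElem_map, List.getElem_range]
    rw [List.getD_eq_getElem l 0 h2]

lemma count_eq (node comp : List Int) (n : Int) (hI : InvAB node comp)
    (hlen : node.length = (n + 1).toNat) :
    (PySem.List.pyRange 0 (n + 1) 1).foldl
      (fun c i => if findA node (node.length + 1) i = 1 then c + 1 else c) (0 : Int)
      = comp.foldl (fun c v => if v = 1 then c + 1 else c) (0 : Int) := by
  obtain ⟨hlc, hbd, hroot⟩ := hI
  rw [pyRange0_eq, List.foldl_map]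
  conv_rhs => rw [← map_getD_range comp, List.foldl_map]
  rw [← hlc, ← hlen]
  apply PySem.List.foldl_congr_mem
  intro acc j hj
  rw [hroot j (by simpa using hj)]

-- ===== VERDICT (by name: the statement is the Claim_ definition above) =====
theorem solution_spec : Claim_equal_solution := by
  intro n pairs _hdom hpre
  unfold Spec_solution
  simp only [solution, solution_alt]
  -- bridge the Array pipeline of port A to its ghost List version
  set arrN := pairs.foldl (fun nd p => setAr nd p.1 p.2)
    ((PySem.List.pyRange 0 (n + 1) 1).toArray) with harrN
  set Lnode := pairs.foldl (fun nd p => setA nd p.1 p.2)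
    (PySem.List.pyRange 0 (n + 1) 1) with hLnode
  have hN : arrN.toList = Lnode := by
    rw [harrN, foldl_setAr_toList]
  have hsz : arrN.size = Lnode.length := by rw [← hN, Array.length_toList]
  have hfun : (fun (c i : Int) => if findAr arrN (arrN.size + 1) i = 1 then c + 1 else c)
      = (fun (c i : Int) => if findA Lnode (Lnode.length + 1) i = 1 then c + 1 else c) := by
    funext c i
    rw [findAr_eq, hN, hsz]
  rw [hfun]
  have hlen0 : (PySem.List.pyRange 0 (n + 1) 1).length = (n + 1).toNat := by
    rw [pyRange0_eq]; simp
  have hgd0 : ∀ j, j < (PySem.List.pyRange 0 (n + 1) 1).length →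
      (PySem.List.pyRange 0 (n + 1) 1).getD j 0 = (j : Int) := by
    intro j hj
    rw [hlen0] at hj
    rw [pyRange0_eq]
    exact PySem.List.getD_map_range _ _ _ _ hj
  have hbd0 : BdA (PySem.List.pyRange 0 (n + 1) 1) := by
    intro j hj
    rw [hgd0 j hj]
    omega
  have hI0 : InvAB (PySem.List.pyRange 0 (n + 1) 1) (PySem.List.pyRange 0 (n + 1) 1) := by
    refine ⟨rfl, hbd0, ?_⟩
    intro j hj
    rw [findA_fix _ j hj (hgd0 j hj), hgd0 j hj]
  have hbounds : ∀ p ∈ pairs,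
      -(((PySem.List.pyRange 0 (n + 1) 1).length : Int)) ≤ p.1 ∧
      p.1 < ((PySem.List.pyRange 0 (n + 1) 1).length : Int) ∧
      -(((PySem.List.pyRange 0 (n + 1) 1).length : Int)) ≤ p.2 ∧
      p.2 < ((PySem.List.pyRange 0 (n + 1) 1).length : Int) := by
    intro p hp
    obtain ⟨a1, a2, a3, a4⟩ := hpre p hp
    have hn : 0 ≤ n := by omega
    rw [hlen0]
    omega
  obtain ⟨hI, hlenF⟩ := fold_preserves pairs _ _ hI0 hbounds
  rw [count_eq _ _ n hI (by rw [hlenF, hlen0])]
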